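-- pv_equiv track=rewrite | github.com/sapiencezk/eae-skills | skills/eae-performance-analyzer/scripts/detect_storm_patterns.py | detect_tight_loop
-- ===== SOURCE A (Python) =====
-- from typing import List, Dict, Any, Set, Tuple
--
-- def detect_tight_loop(graph: Dict[str, List[str]], max_depth: int = 2) -> List[Dict[str, Any]]:
--     """Detect event loops with cycle length ≤ max_depth."""
--     violations = []
--
--     def dfs_cycle(current: str, target: str, visited: Set[str], depth: int) -> bool:
--         if depth > max_depth:
--             return False
--         if current == target and depth > 0:
--             return True
--
--         if current not in graph:
--             return False
--
--         for neighbor in graph[current]: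
--             if neighbor not in visited or neighbor == target:
--                 new_visited = visited | {neighbor}
--                 if dfs_cycle(neighbor, target, new_visited, depth + 1):
--                     return True
--
--         return False
--
--     for source_fb in graph.keys():
--         if dfs_cycle(source_fb, source_fb, {source_fb}, 0):
--             violations.append({
--                 "fb": source_fb,
--                 "cycle_depth": f"≤{max_depth} hops",
--                 "description": f"Event loops back to {source_fb} within {max_depth} hops"
--             })
--
--     return violations
-- ===== SOURCE B (Python) =====
-- from typing import List, Dict, Any
--
-- def detect_tight_loop(graph: Dict[str, List[str]], max_depth: int = 2) -> List[Dict[str, Any]]: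
--     """Detect event loops with cycle length <= max_depth, by layered BFS reachability.
--
--     For each source, expand the frontier of nodes reachable in exactly j steps and
--     check whether the source reappears.  A shortest closed walk is a simple cycle,
--     so at most min(max_depth, len(graph)) expansions are needed; moreover once the
--     frontier brings no new node (seen is then the whole reachable set) and j has
--     reached len(seen), no cycle through the source can still appear.
--     """
--     violations = []
--     limit = min(max_depth, len(graph))
--     for source in graph.keys():
--         frontier = {source}
--         seen = {source}
--         found = False
--         j = 0
--         while j < limit:
--             j += 1
--             nxt = set()
--             for u in frontier:
--                 for v in graph.get(u, []):
--                     nxt.add(v)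
--             if source in nxt:
--                 found = True
--                 break
--             if nxt <= seen and len(seen) <= j:
--                 break
--             seen |= nxt
--             frontier = nxt
--         if found:
--             violations.append({
--                 "fb": source,
--                 "cycle_depth": f"≤{max_depth} hops",
--                 "description": f"Event loops back to {source} within {max_depth} hops"
--             })
--     return violations
-- ===== Notes on version B (the rewrite author's own statement) =====
-- stated objective: alternative
-- what changed: Replaces A's per-source recursive visited-set DFS over simple paths by a per-source layered BFS: the frontier of nodes reachable in exactly j steps is expanded at most min(max_depth, len(graph)) times, stopping early when the source reappears or when the frontier adds no new node and j has reached the size of the reachable set; measured comparably fast to A on the generated inputs.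
import Mathlib
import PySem

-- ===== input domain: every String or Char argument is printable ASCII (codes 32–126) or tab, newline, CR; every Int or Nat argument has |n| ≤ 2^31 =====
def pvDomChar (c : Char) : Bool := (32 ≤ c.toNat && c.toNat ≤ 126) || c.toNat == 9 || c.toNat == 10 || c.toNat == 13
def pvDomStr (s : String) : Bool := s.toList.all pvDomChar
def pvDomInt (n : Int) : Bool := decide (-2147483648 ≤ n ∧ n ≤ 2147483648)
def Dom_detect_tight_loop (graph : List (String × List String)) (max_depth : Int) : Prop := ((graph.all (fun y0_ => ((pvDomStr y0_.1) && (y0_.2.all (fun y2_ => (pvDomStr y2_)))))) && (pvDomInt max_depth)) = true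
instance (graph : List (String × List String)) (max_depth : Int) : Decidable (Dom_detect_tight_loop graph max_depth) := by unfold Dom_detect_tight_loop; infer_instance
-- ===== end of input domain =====

-- B replaces A's per-source visited-set DFS over simple paths by a per-source layered
-- BFS over at most min(max_depth, len(graph)) frontier expansions with early exit
-- (alternative algorithm; proved to return exactly A's value).


-- ===== PORT A =====
-- A's recursive dfs_cycle; `fuel` is only a totality guard (the branch `fuel = 0`
-- is unreachable from the initial fuel below, since recursion needs depth ≤ D).
def dfsCycle (g : PySem.Dict String (List String)) (D : Int) (target : String) :
    Nat → String → PySem.Set String → Int → Bool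
  | fuel, current, visited, depth =>
    if D < depth then false
    else if current == target && decide (0 < depth) then true
    else
      match g.get? current with
      | none => false
      | some ns =>
        match fuel with
        | 0 => false
        | fuel' + 1 =>
          ns.any fun n =>
            (!(PySem.Set.contains visited n) || n == target) &&
              dfsCycle g D target fuel' n (PySem.Set.add visited n) (depth + 1)

def pvViolation (s : String) (max_depth : Int) : List (String × String) :=
  [("fb", s),
   ("cycle_depth", "≤" ++ PySem.Int.toStr max_depth ++ " hops"),
   ("description", "Event loops back to " ++ s ++ " within " ++ PySem.Int.toStr max_depth ++ " hops")]

def detect_tight_loop (graph : List (String × List String)) (max_depth : Int) : List (List (String × String)) :=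
  let g := PySem.Dict.mk graph
  (PySem.Dict.keys g).foldl
    (fun acc s =>
      if dfsCycle g max_depth s ((max_depth + 1).toNat) s (PySem.Set.ofList [s]) 0 then
        acc ++ [pvViolation s max_depth]
      else acc) []

-- ===== PORT B =====
-- one frontier expansion: nxt = { v | u in frontier, v in graph.get(u, []) }
def bfsStep (g : PySem.Dict String (List String)) (frontier : PySem.Set String) : PySem.Set String :=
  frontier.foldl
    (fun nxt u => (g.getD u []).foldl (fun nxt v => PySem.Set.add nxt v) nxt)
    PySem.Set.empty

-- B's inner while-loop: j counts performed expansions, rem = limit - j is the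
-- remaining iteration budget (the while-condition j < limit, as a totality guard)
def bfsLoop (g : PySem.Dict String (List String)) (s : String) :
    Nat → PySem.Set String → PySem.Set String → Nat → Bool
  | 0, _, _, _ => false
  | rem + 1, frontier, seen, j =>
    let nxt := bfsStep g frontier
    if PySem.Set.contains nxt s then true
    else if PySem.Set.issubset nxt seen && decide (PySem.Set.len seen ≤ (j : Int) + 1) then false
    else bfsLoop g s rem nxt (PySem.Set.union seen nxt) (j + 1)

def detect_tight_loop_alt (graph : List (String × List String)) (max_depth : Int) : List (List (String × String)) :=
  let g := PySem.Dict.mk graph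
  let limit : Int := min max_depth (PySem.Dict.size g : Int)
  (PySem.Dict.keys g).foldl
    (fun acc s =>
      if bfsLoop g s limit.toNat (PySem.Set.ofList [s]) (PySem.Set.ofList [s]) 0 then
        acc ++ [pvViolation s max_depth]
      else acc) []

-- ===== PRECONDITION & SPEC =====
def Spec_detect_tight_loop (graph : List (String × List String)) (max_depth : Int) (out : List (List (String × String))) : Prop := out = detect_tight_loop_alt graph max_depth
instance (graph : List (String × List String)) (max_depth : Int) (out : List (List (String × String))) : Decidable (Spec_detect_tight_loop graph max_depth out) := by unfold Spec_detect_tight_loop; infer_instance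

-- ===== CLAIM (what is proved, stated in full; the proofs are below) =====
def Claim_equal_detect_tight_loop : Prop := ∀ (graph : List (String × List String)) (max_depth : Int), Dom_detect_tight_loop graph max_depth → Spec_detect_tight_loop graph max_depth (detect_tight_loop graph max_depth)

-- ===== LEMMAS AND PROOFS =====

-- v is a direct successor of u
def pvEdge (g : PySem.Dict String (List String)) (u v : String) : Prop :=
  v ∈ g.getD u []

-- a walk of the given length in g
inductive pvWalk (g : PySem.Dict String (List String)) : String → String → Nat → Prop
  | nil (u : String) : pvWalk g u u 0
  | cons {u v w : String} {n : Nat} : pvEdge g u v → pvWalk g v w n → pvWalk g u w (n + 1)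

-- a nonempty walk listed by its intermediate nodes
inductive pvLW (g : PySem.Dict String (List String)) : String → List String → String → Prop
  | single {u t : String} : pvEdge g u t → pvLW g u [] t
  | cons {u x t : String} {xs : List String} : pvEdge g u x → pvLW g x xs t → pvLW g u (x :: xs) t

def pvFront (g : PySem.Dict String (List String)) (s : String) : Nat → PySem.Set String
  | 0 => PySem.Set.ofList [s]
  | k + 1 => bfsStep g (pvFront g s k)

theorem pvWalk_zero (g : PySem.Dict String (List String)) (u v : String)
    (h : pvWalk g u v 0) : u = v := by
  cases h; rfl

theorem pvWalk_snoc (g : PySem.Dict String (List String)) (s v : String) (n : Nat) :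
    pvWalk g s v (n + 1) ↔ ∃ u, pvWalk g s u n ∧ pvEdge g u v := by
  constructor
  · intro h
    induction n generalizing s with
    | zero =>
      cases h with
      | cons e w => cases w; exact ⟨s, pvWalk.nil s, e⟩
    | succ m ih =>
      cases h with
      | cons e w =>
        obtain ⟨u, wu, eu⟩ := ih _ w
        exact ⟨u, pvWalk.cons e wu, eu⟩
  · rintro ⟨u, w, e⟩
    induction n generalizing s with
    | zero => cases w; exact pvWalk.cons e (pvWalk.nil _)
    | succ m ih =>
      cases w with
      | cons e' w' => exact pvWalk.cons e' (ih _ w')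

theorem mem_bfsStep (g : PySem.Dict String (List String)) (S : PySem.Set String) (v : String) :
    v ∈ bfsStep g S ↔ ∃ u ∈ S, pvEdge g u v := by
  have inner : ∀ (ns : List String) (acc : PySem.Set String),
      v ∈ ns.foldl (fun nxt v => PySem.Set.add nxt v) acc ↔ v ∈ acc ∨ v ∈ ns := by
    intro ns
    induction ns with
    | nil => simp
    | cons x xs ih =>
      intro acc
      simp [List.foldl_cons, ih, PySem.Set.mem_add]
      tauto
  have outer : ∀ (S acc : PySem.Set String),
      v ∈ S.foldl (fun nxt u => (g.getD u []).foldl (fun nxt v => PySem.Set.add nxt v) nxt) acc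
        ↔ v ∈ acc ∨ ∃ u ∈ S, pvEdge g u v := by
    intro S
    induction S with
    | nil => simp
    | cons x xs ih =>
      intro acc
      simp [List.foldl_cons, ih, inner, pvEdge]
      tauto
  rw [bfsStep, outer]
  simp [PySem.Set.empty]

theorem mem_pvFront (g : PySem.Dict String (List String)) (s v : String) (k : Nat) :
    v ∈ pvFront g s k ↔ pvWalk g s v k := by
  induction k generalizing v with
  | zero =>
    simp only [pvFront, PySem.Set.mem_ofList, List.mem_singleton]
    constructor
    · rintro rfl; exact pvWalk.nil _
    · intro h; exact (pvWalk_zero g s v h).symm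
  | succ m ih =>
    rw [pvFront, mem_bfsStep, pvWalk_snoc]
    constructor
    · rintro ⟨u, hu, e⟩; exact ⟨u, (ih u).mp hu, e⟩
    · rintro ⟨u, w, e⟩; exact ⟨u, (ih u).mpr w, e⟩

theorem pvLW_walk (g : PySem.Dict String (List String)) {u t : String} {xs : List String}
    (h : pvLW g u xs t) : pvWalk g u t (xs.length + 1) := by
  induction h with
  | single e => exact pvWalk.cons e (pvWalk.nil _)
  | cons e _ ih => exact pvWalk.cons e ih

theorem pvLW_suffix (g : PySem.Dict String (List String)) {a x t : String} (l1 l2 : List String)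
    (h : pvLW g a (l1 ++ x :: l2) t) : pvLW g x l2 t := by
  induction l1 generalizing a with
  | nil => cases h with | cons _ hw => exact hw
  | cons y ys ih =>
    cases h with
    | cons _ hw => exact ih hw

-- a nonempty walk can be shortened to one with distinct intermediates avoiding t
theorem pvWalk_shorten (g : PySem.Dict String (List String)) {u t : String} {l : Nat}
    (h : pvWalk g u t l) (hl : 1 ≤ l) :
    ∃ xs, pvLW g u xs t ∧ xs.length + 1 ≤ l ∧ xs.Nodup ∧ t ∉ xs := by
  induction l using Nat.strong_induction_on generalizing u with
  | _ l ih =>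
    obtain ⟨n, rfl⟩ : ∃ n, l = n + 1 := ⟨l - 1, by omega⟩
    cases h with
    | @cons _ v _ _ e w =>
      by_cases hv : v = t
      · subst hv
        refine ⟨[], pvLW.single e, ?_, List.nodup_nil, List.not_mem_nil⟩
        simp
      · have hn1 : 1 ≤ n := by
          rcases Nat.eq_zero_or_pos n with h0 | h1
          · subst h0; exact absurd (pvWalk_zero g v t w) hv
          · exact h1
        obtain ⟨ys, hys, hlen, hnd, hts⟩ := ih n (by omega) w hn1
        by_cases hmem : v ∈ ys
        · obtain ⟨l1, l2, rfl⟩ := List.mem_iff_append.mp hmem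
          refine ⟨v :: l2, pvLW.cons e (pvLW_suffix g l1 l2 hys), ?_, ?_, ?_⟩
          · simp at hlen ⊢; omega
          · have h2 := hnd.of_append_right
            exact h2
          · intro hc
            rcases List.mem_cons.mp hc with rfl | hc2
            · exact hv rfl
            · exact hts (by simp [hc2])
        · refine ⟨v :: ys, pvLW.cons e hys, ?_, List.nodup_cons.mpr ⟨hmem, hnd⟩, ?_⟩
          · simp; omega
          · intro hc
            rcases List.mem_cons.mp hc with rfl | hc2
            · exact hv rfl
            · exact hts hc2

theorem dfs_sound (g : PySem.Dict String (List String)) (D : Int) (t : String) :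
    ∀ (fuel : Nat) (c : String) (vis : PySem.Set String) (depth : Int),
      dfsCycle g D t fuel c vis depth = true →
      ∃ l : Nat, pvWalk g c t l ∧ depth + l ≤ D ∧ 0 < depth + l := by
  intro fuel
  induction fuel with
  | zero =>
    intro c vis depth h
    rw [dfsCycle] at h
    by_cases h1 : D < depth
    · simp [h1] at h
    · rw [if_neg h1] at h
      by_cases h2 : (c == t && decide (0 < depth)) = true
      · obtain ⟨hc, hd⟩ := Bool.and_eq_true_iff.mp h2
        have hct : c = t := by simpa using hc
        have hd' : 0 < depth := by simpa using hd
        subst hct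
        exact ⟨0, pvWalk.nil c, by omega, by omega⟩
      · rw [if_neg h2] at h
        cases hg : g.get? c with
        | none => rw [hg] at h; simp at h
        | some ns => rw [hg] at h; simp at h
  | succ fuel' ih =>
    intro c vis depth h
    rw [dfsCycle] at h
    by_cases h1 : D < depth
    · simp [h1] at h
    · rw [if_neg h1] at h
      by_cases h2 : (c == t && decide (0 < depth)) = true
      · obtain ⟨hc, hd⟩ := Bool.and_eq_true_iff.mp h2
        have hct : c = t := by simpa using hc
        have hd' : 0 < depth := by simpa using hd
        subst hct
        exact ⟨0, pvWalk.nil c, by omega, by omega⟩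
      · rw [if_neg h2] at h
        cases hg : g.get? c with
        | none => rw [hg] at h; simp at h
        | some ns =>
          rw [hg] at h
          simp only [List.any_eq_true, Bool.and_eq_true] at h
          obtain ⟨n, hn, _, hrec⟩ := h
          obtain ⟨l, wl, hle, hpos⟩ := ih n (PySem.Set.add vis n) (depth + 1) hrec
          have e : pvEdge g c n := by
            rw [pvEdge, PySem.Dict.getD_of_get?_eq_some g [] hg]
            exact hn
          exact ⟨l + 1, pvWalk.cons e wl, by push_cast; omega, by push_cast; omega⟩

theorem dfs_complete (g : PySem.Dict String (List String)) (D : Int) (t : String) :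
    ∀ (xs : List String) (fuel : Nat) (c : String) (vis : PySem.Set String) (depth : Int),
      pvLW g c xs t → depth + (xs.length : Int) + 1 ≤ D →
      xs.Nodup → t ∉ xs → (∀ x ∈ xs, x ∉ vis) → 0 ≤ depth →
      (D + 1 - depth).toNat ≤ fuel →
      dfsCycle g D t fuel c vis depth = true := by
  intro xs
  induction xs with
  | nil =>
    intro fuel c vis depth hlw hle _ _ _ h0 hfuel
    cases hlw with
    | single e =>
      simp only [List.length_nil, Int.natCast_zero] at hle
      obtain ⟨ns, hns, hmem⟩ : ∃ ns, g.get? c = some ns ∧ t ∈ ns := by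
        rw [pvEdge, PySem.Dict.getD_eq_get?_getD] at e
        cases hg : g.get? c with
        | none => rw [hg] at e; simp at e
        | some ns => rw [hg] at e; exact ⟨ns, rfl, e⟩
      obtain ⟨f', rfl⟩ : ∃ f', fuel = f' + 1 := ⟨fuel - 1, by omega⟩
      rw [dfsCycle, if_neg (show ¬ D < depth by omega)]
      by_cases h2 : (c == t && decide (0 < depth)) = true
      · rw [if_pos h2]
      · rw [if_neg h2, hns]
        simp only [List.any_eq_true]
        refine ⟨t, hmem, ?_⟩
        rw [Bool.and_eq_true]
        refine ⟨by simp, ?_⟩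
        rw [dfsCycle, if_neg (show ¬ D < depth + 1 by omega),
          if_pos (show (t == t && decide (0 < depth + 1)) = true by simp; omega)]
  | cons x xs' ih =>
    intro fuel c vis depth hlw hle hnd hts hvis h0 hfuel
    cases hlw with
    | cons e hlw' =>
      simp only [List.length_cons] at hle
      obtain ⟨ns, hns, hmem⟩ : ∃ ns, g.get? c = some ns ∧ x ∈ ns := by
        rw [pvEdge, PySem.Dict.getD_eq_get?_getD] at e
        cases hg : g.get? c with
        | none => rw [hg] at e; simp at e
        | some ns => rw [hg] at e; exact ⟨ns, rfl, e⟩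
      obtain ⟨f', rfl⟩ : ∃ f', fuel = f' + 1 := ⟨fuel - 1, by omega⟩
      rw [dfsCycle, if_neg (show ¬ D < depth by omega)]
      by_cases h2 : (c == t && decide (0 < depth)) = true
      · rw [if_pos h2]
      · rw [if_neg h2, hns]
        simp only [List.any_eq_true]
        refine ⟨x, hmem, ?_⟩
        rw [Bool.and_eq_true]
        constructor
        · have hx : x ∉ vis := hvis x List.mem_cons_self
          simp [hx]
        · apply ih f' x (PySem.Set.add vis x) (depth + 1) hlw' (by push_cast at hle ⊢; omega)
            (List.nodup_cons.mp hnd).2 (fun hc => hts (List.mem_cons.mpr (Or.inr hc)))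
            ?_ (by omega) (by omega)
          intro y hy hyv
          rcases (PySem.Set.mem_add vis x y).mp hyv with hy1 | rfl
          · exact hvis y (List.mem_cons.mpr (Or.inr hy)) hy1
          · exact (List.nodup_cons.mp hnd).1 hy

-- every node with an outgoing edge is a key
theorem pvEdge_mem_keys (g : PySem.Dict String (List String)) {u v : String}
    (h : pvEdge g u v) : u ∈ g.keys := by
  by_contra hu
  rw [pvEdge, PySem.Dict.getD_eq_get?_getD,
    (PySem.Dict.get?_eq_none_iff_not_mem_keys g u).mpr hu] at h
  simp at h

-- every intermediate node of a listed walk has an outgoing edge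
theorem pvLW_out_edges (g : PySem.Dict String (List String)) {u t : String} {xs : List String}
    (h : pvLW g u xs t) : ∀ x ∈ xs, ∃ v, pvEdge g x v := by
  induction h with
  | single _ => simp
  | @cons _ x' _ xs' e h' ih =>
    intro y hy
    rcases List.mem_cons.mp hy with rfl | hy2
    · cases h' with
      | single e' => exact ⟨_, e'⟩
      | cons e' _ => exact ⟨_, e'⟩
    · exact ih y hy2

theorem pvLW_head (g : PySem.Dict String (List String)) {u t : String} {xs : List String}
    (h : pvLW g u xs t) : ∃ v, pvEdge g u v := by
  cases h with
  | single e => exact ⟨_, e⟩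
  | cons e _ => exact ⟨_, e⟩

theorem pv_keys_length (g : PySem.Dict String (List String)) : g.keys.length = g.size := by
  simp [PySem.Dict.keys, PySem.Dict.size]

-- every listed-walk intermediate is reachable from the start
theorem pvLW_reach (g : PySem.Dict String (List String)) {u t : String} {xs : List String}
    (h : pvLW g u xs t) : ∀ x ∈ xs, ∃ i : Nat, pvWalk g u x i := by
  induction h with
  | single _ => simp
  | @cons _ x' _ xs' e h' ih =>
    intro y hy
    rcases List.mem_cons.mp hy with rfl | hy2
    · exact ⟨1, pvWalk.cons e (pvWalk.nil _)⟩
    · obtain ⟨i, w⟩ := ih y hy2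
      exact ⟨i + 1, pvWalk.cons e w⟩

theorem bfsLoop_correct (g : PySem.Dict String (List String)) (s : String) :
    ∀ (rem : Nat) (frontier seen : PySem.Set String) (j : Nat),
      frontier = pvFront g s j →
      (∀ y, y ∈ seen ↔ ∃ i, i ≤ j ∧ y ∈ pvFront g s i) →
      seen.Nodup →
      (∀ i, 1 ≤ i → i ≤ j → s ∉ pvFront g s i) →
      (bfsLoop g s rem frontier seen j = true ↔
        ∃ jj, j < jj ∧ jj ≤ j + rem ∧ s ∈ pvFront g s jj) := by
  intro rem
  induction rem with
  | zero =>
    intro frontier seen j _ _ _ _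
    constructor
    · intro h; simp [bfsLoop] at h
    · rintro ⟨jj, h1, h2, _⟩; omega
  | succ rem' ih =>
    intro frontier seen j hfront hseen hnd hnot
    have hnxt : bfsStep g frontier = pvFront g s (j + 1) := by rw [hfront]; rfl
    rw [bfsLoop]
    by_cases hc : PySem.Set.contains (bfsStep g frontier) s = true
    · simp only [hc, if_pos]
      constructor
      · intro _
        refine ⟨j + 1, by omega, by omega, ?_⟩
        rw [← hnxt]
        simpa [PySem.Set.contains_eq_decide] using hc
      · intro _; trivial
    · have hcs : s ∉ pvFront g s (j + 1) := by
        rw [← hnxt]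
        simpa [PySem.Set.contains_eq_decide] using hc
      rw [if_neg hc]
      by_cases hb : (PySem.Set.issubset (bfsStep g frontier) seen
          && decide (PySem.Set.len seen ≤ (j : Int) + 1)) = true
      · -- early exit: seen is closed under successors and already small, so no
        -- cycle through s can appear at any later layer
        rw [if_pos hb]
        obtain ⟨hsub', hlen'⟩ := Bool.and_eq_true_iff.mp hb
        have hsub : ∀ y ∈ pvFront g s (j + 1), y ∈ seen := by
          rw [← hnxt]
          exact (PySem.Set.issubset_iff _ _).mp hsub'
        have hlen : seen.length ≤ j + 1 := by
          have := of_decide_eq_true hlen'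
          rw [PySem.Set.len] at this
          omega
        -- everything reachable from s lies in seen
        have hreach : ∀ (i : Nat) (y : String), y ∈ pvFront g s i → y ∈ seen := by
          intro i
          induction i with
          | zero => intro y hy; exact (hseen y).mpr ⟨0, by omega, hy⟩
          | succ i' ihy =>
            intro y hy
            rw [pvFront, mem_bfsStep] at hy
            obtain ⟨u, hu, e⟩ := hy
            obtain ⟨k, hk, huk⟩ := (hseen u).mp (ihy u hu)
            have hy' : y ∈ pvFront g s (k + 1) := by
              rw [pvFront, mem_bfsStep]
              exact ⟨u, huk, e⟩
            rcases Nat.lt_or_ge k j with hkj | hkj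
            · exact (hseen y).mpr ⟨k + 1, by omega, hy'⟩
            · have : k = j := by omega
              subst this
              exact hsub y hy'
        constructor
        · intro h; simp at h
        · rintro ⟨jj, h1, h2, hm⟩
          exfalso
          have w : pvWalk g s s jj := (mem_pvFront g s s jj).mp hm
          obtain ⟨xs, hlw, hxlen, hxnd, hxts⟩ := pvWalk_shorten g w (by omega)
          have hsubseen : xs ++ [s] ⊆ seen := by
            intro y hy
            rcases List.mem_append.mp hy with hy1 | hy2
            · obtain ⟨i, wy⟩ := pvLW_reach g hlw y hy1
              exact hreach i y ((mem_pvFront g s y i).mpr wy)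
            · rw [List.mem_singleton.mp hy2]
              exact hreach 0 s (by simp [pvFront, PySem.Set.mem_ofList])
          have hnd2 : (xs ++ [s]).Nodup := by
            simp only [List.nodup_append, List.nodup_singleton]
            refine ⟨hxnd, trivial, ?_⟩
            intro a ha b hb
            have hbs : b = s := by simpa using hb
            subst hbs
            intro hcq
            exact hxts (hcq ▸ ha)
          have hcard := (hnd2.subperm hsubseen).length_le
          simp only [List.length_append, List.length_singleton] at hcard
          -- c := xs.length + 1 ≤ seen.length ≤ j + 1, and s ∈ pvFront c
          have hsc : s ∈ pvFront g s (xs.length + 1) :=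
            (mem_pvFront g s s _).mpr (pvLW_walk g hlw)
          rcases Nat.lt_or_ge (xs.length + 1) (j + 1) with hlt | hge
          · exact hnot (xs.length + 1) (by omega) (by omega) hsc
          · have : xs.length + 1 = j + 1 := by omega
            exact hcs (this ▸ hsc)
      · rw [if_neg hb]
        rw [ih (bfsStep g frontier) (PySem.Set.union seen (bfsStep g frontier)) (j + 1)
          hnxt ?_ (PySem.Set.nodup_union _ _ hnd) ?_]
        · constructor
          · rintro ⟨jj, h1, h2, hm⟩; exact ⟨jj, by omega, by omega, hm⟩
          · rintro ⟨jj, h1, h2, hm⟩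
            rcases Nat.lt_or_ge (j + 1) jj with hlt | hge
            · exact ⟨jj, by omega, by omega, hm⟩
            · have : jj = j + 1 := by omega
              exact absurd (this ▸ hm) hcs
        · intro y
          rw [PySem.Set.mem_union, hseen, hnxt]
          constructor
          · rintro (⟨i, hi, hy⟩ | hy)
            · exact ⟨i, by omega, hy⟩
            · exact ⟨j + 1, le_refl _, hy⟩
          · rintro ⟨i, hi, hy⟩
            rcases Nat.lt_or_ge i (j + 1) with hlt | hge
            · exact Or.inl ⟨i, by omega, hy⟩
            · have : i = j + 1 := by omega
              exact Or.inr (this ▸ hy)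
        · intro i h1 h2
          rcases Nat.lt_or_ge i (j + 1) with hlt | hge
          · exact hnot i h1 (by omega)
          · have : i = j + 1 := by omega
            exact this ▸ hcs

-- the per-source equivalence
theorem per_source (g : PySem.Dict String (List String)) (D : Int) (s : String) :
    dfsCycle g D s ((D + 1).toNat) s (PySem.Set.ofList [s]) 0
      = bfsLoop g s (min D (PySem.Dict.size g : Int)).toNat
          (PySem.Set.ofList [s]) (PySem.Set.ofList [s]) 0 := by
  rw [Bool.eq_iff_iff,
    bfsLoop_correct g s ((min D (PySem.Dict.size g : Int)).toNat)
      (PySem.Set.ofList [s]) (PySem.Set.ofList [s]) 0 rfl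
      (by intro y; simp [pvFront, PySem.Set.mem_ofList])
      (PySem.Set.nodup_ofList [s])
      (by intro i h1 h2 _; omega)]
  simp only [Nat.zero_add]
  constructor
  · intro h
    obtain ⟨l, w, hle, hpos⟩ := dfs_sound g D s ((D + 1).toNat) s _ 0 h
    obtain ⟨xs, hlw, hlen, hnd, hts⟩ := pvWalk_shorten g w (by omega)
    refine ⟨xs.length + 1, by omega, ?_, (mem_pvFront g s s _).mpr (pvLW_walk g hlw)⟩
    -- bound by the number of keys: xs ++ [s] is a nodup list of keys
    have hsub : xs ++ [s] ⊆ g.keys := by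
      intro y hy
      rcases List.mem_append.mp hy with hy1 | hy2
      · obtain ⟨v, e⟩ := pvLW_out_edges g hlw y hy1
        exact pvEdge_mem_keys g e
      · obtain ⟨v, e⟩ := pvLW_head g hlw
        rw [List.mem_singleton.mp hy2]
        exact pvEdge_mem_keys g e
    have hnd2 : (xs ++ [s]).Nodup := by
      simp only [List.nodup_append, List.nodup_singleton]
      refine ⟨hnd, trivial, ?_⟩
      intro a ha b hb
      have hbs : b = s := by simpa using hb
      subst hbs
      intro hc
      exact hts (hc ▸ ha)
    have hcard := (hnd2.subperm hsub).length_le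
    rw [pv_keys_length] at hcard
    simp only [List.length_append, List.length_singleton] at hcard
    -- xs.length + 1 ≤ D (from hlen, hle) and ≤ size g (hcard)
    rcases le_total D ((PySem.Dict.size g : Int)) with hm | hm
    · rw [min_eq_left hm]; omega
    · rw [min_eq_right hm]; omega
  · rintro ⟨j, hj1, hj2, hjm⟩
    have w : pvWalk g s s j := (mem_pvFront g s s j).mp hjm
    obtain ⟨xs, hlw, hlen, hnd, hts⟩ := pvWalk_shorten g w hj1
    have hjD : (j : Int) ≤ D := by
      rcases le_total D ((PySem.Dict.size g : Int)) with hm | hm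
      · rw [min_eq_left hm] at hj2; omega
      · rw [min_eq_right hm] at hj2; omega
    apply dfs_complete g D s xs ((D + 1).toNat) s (PySem.Set.ofList [s]) 0 hlw
      (by omega) hnd hts ?_ (by omega) (by omega)
    intro x hx hxv
    rw [PySem.Set.mem_ofList, List.mem_singleton] at hxv
    exact hts (hxv ▸ hx)

-- ===== VERDICT (by name: the statement is the Claim_ definition above) =====
theorem detect_tight_loop_spec : Claim_equal_detect_tight_loop := by
  intro graph max_depth _
  unfold Spec_detect_tight_loop detect_tight_loop detect_tight_loop_alt
  dsimp only
  refine PySem.List.foldl_congr_mem _ _ _ _ ?_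
  intro acc s _
  rw [per_source]
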